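-- pv_equiv track=rewrite | github.com/jfisteus/eyegrade | eyegrade/create/latex.py | _choose_num_tables
-- ===== SOURCE A (Python) =====
-- PARAM_TABLE_LMITS = [8, 24, 55]
--
-- def _choose_num_tables(num_questions):
--     """Returns a good number of tables for the given number of questions."""
--     num_tables = 1
--     for numq in PARAM_TABLE_LMITS:
--         if numq >= num_questions:
--             break
--         else:
--             num_tables += 1
--     return num_tables
-- ===== SOURCE B (Python) =====
-- import bisect
--
-- PARAM_TABLE_LMITS = [8, 24, 55]
--
-- def _choose_num_tables(num_questions):
--     """Returns a good number of tables for the given number of questions."""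
--     return 1 + bisect.bisect_left(PARAM_TABLE_LMITS, num_questions)
-- ===== Notes on version B (the rewrite author's own statement) =====
-- stated objective: idiomatic
-- what changed: Replaces the explicit scan-and-break loop with a single stdlib binary-search call: the answer is 1 plus bisect_left's insertion index, i.e. the count of limits strictly below num_questions.
import Mathlib
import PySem

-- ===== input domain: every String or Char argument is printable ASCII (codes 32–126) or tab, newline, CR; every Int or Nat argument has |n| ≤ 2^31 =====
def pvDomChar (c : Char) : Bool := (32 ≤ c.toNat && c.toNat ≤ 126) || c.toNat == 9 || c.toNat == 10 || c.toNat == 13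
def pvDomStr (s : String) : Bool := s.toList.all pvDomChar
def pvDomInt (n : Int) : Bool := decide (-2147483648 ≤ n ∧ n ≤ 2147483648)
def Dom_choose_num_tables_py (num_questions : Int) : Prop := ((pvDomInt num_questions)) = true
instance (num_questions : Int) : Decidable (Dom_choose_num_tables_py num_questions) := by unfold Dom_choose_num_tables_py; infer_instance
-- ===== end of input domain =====

-- B replaces A's linear scan-and-break loop with a stdlib binary search (bisect_left);
-- return values are proved identical for all inputs (idiomatic rewrite, not a speed claim).

-- ===== PORT A =====
def PARAM_TABLE_LMITS : List Int := [8, 24, 55]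

-- A: loop over the limits, break on the first limit ≥ num_questions, counting from 1.
def chooseLoop (num_questions : Int) : List Int → Int → Int
  | [], num_tables => num_tables
  | numq :: rest, num_tables =>
    if numq ≥ num_questions then num_tables
    else chooseLoop num_questions rest (num_tables + 1)

def choose_num_tables_py (num_questions : Int) : Int :=
  chooseLoop num_questions PARAM_TABLE_LMITS 1

-- ===== PORT B =====
def choose_num_tables_py_alt (num_questions : Int) : Int :=
  1 + (PySem.List.bisectLeft PARAM_TABLE_LMITS num_questions : Int)

-- ===== PRECONDITION & SPEC =====
def Spec_choose_num_tables_py (num_questions : Int) (out : Int) : Prop := out = choose_num_tables_py_alt num_questions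
instance (num_questions : Int) (out : Int) : Decidable (Spec_choose_num_tables_py num_questions out) := by unfold Spec_choose_num_tables_py; infer_instance

-- ===== CLAIM (what is proved, stated in full; the proofs are below) =====
def Claim_equal_choose_num_tables_py : Prop := ∀ (num_questions : Int), Dom_choose_num_tables_py num_questions → Spec_choose_num_tables_py num_questions (choose_num_tables_py num_questions)

-- ===== LEMMAS AND PROOFS =====

-- Both sides reduce, for symbolic n, to the same three-way case split on n vs 8, 24, 55.
lemma choose_loop_cases (n : Int) :
    choose_num_tables_py n =
      if 8 ≥ n then 1 else if 24 ≥ n then 2 else if 55 ≥ n then 3 else 4 := by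
  simp only [choose_num_tables_py, PARAM_TABLE_LMITS, chooseLoop]
  split_ifs <;> norm_num

lemma bisect_cases (n : Int) :
    choose_num_tables_py_alt n =
      if 8 ≥ n then 1 else if 24 ≥ n then 2 else if 55 ≥ n then 3 else 4 := by
  obtain ⟨h1, h2, h3⟩ := PySem.List.bisectLeft_spec [8, 24, 55] n (by norm_num)
  simp only [choose_num_tables_py_alt, PARAM_TABLE_LMITS]
  set k := PySem.List.bisectLeft [8, 24, 55] n with hk
  have e0 := h2 0 (by norm_num); have e1 := h2 1 (by norm_num); have e2 := h2 2 (by norm_num)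
  have f0 := h3 0 (by norm_num); have f1 := h3 1 (by norm_num); have f2 := h3 2 (by norm_num)
  simp only [List.length_cons, List.length_nil, List.getElem_cons_zero,
    List.getElem_cons_succ] at h1 e0 e1 e2 f0 f1 f2
  interval_cases k <;> split_ifs <;> simp_all <;> omega

-- ===== VERDICT (by name: the statement is the Claim_ definition above) =====
theorem choose_num_tables_py_spec : Claim_equal_choose_num_tables_py := by
  intro n _
  unfold Spec_choose_num_tables_py
  rw [choose_loop_cases, bisect_cases]
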